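-- pv_equiv track=rewrite | github.com/blackrock/aladdinsdk | aladdinsdk/common/datatransformation/json_to_pandas.py | _extend_path_combination
-- ===== SOURCE A (Python) =====
-- def _append_if_unique(options_list, el):
--     if el not in options_list:
--         options_list.append(el)
--
-- def _extend_path_combination(options_list):
--     additional_arr = []
--     for el in options_list:
--         lst = el.split(".")
--         i = 0
--         pure = []
--         while i < len(lst):
--             if lst[i].startswith("["):
--                 pure.append(i)
--             i = i+1
--         for i in pure:
--             if i > 0:
--                 _append_if_unique(additional_arr, ".".join(lst[:i]))
--             else:
--                 _append_if_unique(additional_arr, lst[i])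
--             lst[i] = "[*]"
--         _append_if_unique(additional_arr, ".".join(lst))
--     return additional_arr
-- ===== SOURCE B (Python) =====
-- def _extend_path_combination(options_list):
--     out = []
--
--     def emit(s):
--         if s not in out:
--             out.append(s)
--
--     for el in options_list:
--         prefix = []
--         for tok in el.split("."):
--             if tok.startswith("["):
--                 emit(".".join(prefix) if prefix else tok)
--                 prefix.append("[*]")
--             else:
--                 prefix.append(tok)
--         emit(".".join(prefix))
--     return out
-- ===== Notes on version B (the rewrite author's own statement) =====
-- stated objective: simpler
-- what changed: Replaces A's two-phase build-an-index-list-then-iterate-positions-with-in-place-mutation by a single left-to-right pass per element that maintains an accumulator of already-wildcarded prefix tokens and emits prefixes directly.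
import Mathlib
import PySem

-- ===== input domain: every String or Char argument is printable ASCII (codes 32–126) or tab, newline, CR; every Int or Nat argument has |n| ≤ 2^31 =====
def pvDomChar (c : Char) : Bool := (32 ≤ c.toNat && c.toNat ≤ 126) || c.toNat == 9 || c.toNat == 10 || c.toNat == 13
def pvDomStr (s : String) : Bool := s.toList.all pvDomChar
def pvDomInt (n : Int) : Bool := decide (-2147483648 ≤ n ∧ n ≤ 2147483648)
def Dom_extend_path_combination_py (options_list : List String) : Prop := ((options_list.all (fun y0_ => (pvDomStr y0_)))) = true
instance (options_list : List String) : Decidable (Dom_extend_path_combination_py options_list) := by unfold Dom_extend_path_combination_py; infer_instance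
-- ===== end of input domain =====

-- B replaces A's build-bracket-index-list-then-mutate-in-place scheme with one direct
-- accumulating pass per element (objective: simpler; same asymptotic cost).


-- ===== PORT A =====
-- _append_if_unique (A mutates the passed list in place; here it returns the updated list)
def appendIfUnique (options_list : List String) (el : String) : List String :=
  if options_list.contains el then options_list else options_list ++ [el]

-- the while-loop collecting indices of tokens that start with "[" into `pure`
-- (lst.getD i "" = lst[i]; the guard guarantees i is in range)
def aCollect (lst : List String) (i : Nat) (pure : List Nat) : List Nat :=
  if i < lst.length then
    aCollect lst (i + 1) (if PySem.Str.startswith (lst.getD i "") "[" then pure ++ [i] else pure)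
  else pure
termination_by lst.length - i
decreasing_by omega

-- the for-loop over `pure`: emit '.'.join(lst[:i]) (or lst[i] when i = 0), set lst[i] := "[*]"
def aApply (pure : List Nat) (arr : List String) (lst : List String) :
    List String × List String :=
  match pure with
  | [] => (arr, lst)
  | i :: rest =>
    let arr' := if i > 0 then appendIfUnique arr (PySem.Str.join "." (lst.take i))
                else appendIfUnique arr (lst.getD i "")   -- i < lst.length always holds here
    aApply rest arr' (lst.set i "[*]")

def extend_path_combination_py (options_list : List String) : List String :=
  options_list.foldl (fun additional_arr el =>
    let lst := (PySem.Str.split? el ".").getD []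
    let pure := aCollect lst 0 []
    let p := aApply pure additional_arr lst
    appendIfUnique p.1 (PySem.Str.join "." p.2)) []

-- ===== PORT B =====
def bEmit (out : List String) (s : String) : List String :=
  if out.contains s then out else out ++ [s]

def bStep (st : List String × List String) (tok : String) : List String × List String :=
  if PySem.Str.startswith tok "[" then
    (bEmit st.1 (if st.2.isEmpty then tok else PySem.Str.join "." st.2), st.2 ++ ["[*]"])
  else (st.1, st.2 ++ [tok])

def extend_path_combination_py_alt (options_list : List String) : List String :=
  options_list.foldl (fun out el =>
    let st := ((PySem.Str.split? el ".").getD []).foldl bStep (out, [])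
    bEmit st.1 (PySem.Str.join "." st.2)) []

-- ===== PRECONDITION & SPEC =====
def Spec_extend_path_combination_py (options_list : List String) (out : List String) : Prop := out = extend_path_combination_py_alt options_list
instance (options_list : List String) (out : List String) : Decidable (Spec_extend_path_combination_py options_list out) := by unfold Spec_extend_path_combination_py; infer_instance

-- ===== CLAIM (what is proved, stated in full; the proofs are below) =====
def Claim_equal_extend_path_combination_py : Prop := ∀ (options_list : List String), Dom_extend_path_combination_py options_list → Spec_extend_path_combination_py options_list (extend_path_combination_py options_list)

-- ===== LEMMAS AND PROOFS =====

-- indices (within `rest`) of tokens starting with "["; closed-form description of aCollect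
def pureOf (rest : List String) : List Nat :=
  match rest with
  | [] => []
  | t :: ts => (if PySem.Str.startswith t "[" then [0] else []) ++ (pureOf ts).map (· + 1)

theorem getD_append_len (done : List String) (t : String) (ts : List String) :
    (done ++ t :: ts).getD done.length "" = t := by
  induction done with
  | nil => rfl
  | cons x xs ih => exact ih

theorem take_append_len (done : List String) (t : String) (ts : List String) :
    (done ++ t :: ts).take done.length = done := by
  induction done with
  | nil => rfl
  | cons x xs ih => simp [ih]

theorem set_append_len (done : List String) (t b : String) (ts : List String) :
    (done ++ t :: ts).set done.length b = done ++ b :: ts := by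
  induction done with
  | nil => rfl
  | cons x xs ih => simp [ih]

theorem collect_eq (rest : List String) : ∀ (done : List String) (acc : List Nat),
    aCollect (done ++ rest) done.length acc = acc ++ (pureOf rest).map (· + done.length) := by
  induction rest with
  | nil =>
    intro done acc
    rw [aCollect]
    simp [pureOf]
  | cons t ts ih =>
    intro done acc
    rw [aCollect]
    have hlt : done.length < (done ++ t :: ts).length := by simp
    rw [if_pos hlt, getD_append_len]
    have hstr : PySem.Str.startswith t "[" = PySem.Chars.startswith t.toList ['['] := by simp
    have hre : done ++ t :: ts = (done ++ [t]) ++ ts := by simp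
    have hlen : done.length + 1 = (done ++ [t]).length := by simp
    have hmap : ∀ ps : List Nat, (ps.map (· + 1)).map (· + done.length)
        = ps.map (· + (done.length + 1)) := by
      intro ps; rw [List.map_map]; apply List.map_congr_left; intro x _; simp; omega
    cases hb : PySem.Chars.startswith t.toList ['['] with
    | true =>
      rw [hstr, hb, if_pos rfl, hre, hlen, ih (done ++ [t]) (acc ++ [done.length])]
      simp [pureOf, hb, hmap]
    | false =>
      rw [hstr, hb, if_neg (by simp), hre, hlen, ih (done ++ [t]) acc]
      simp [pureOf, hb, hmap]

theorem main_eq (rest : List String) : ∀ (arr done : List String),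
    (appendIfUnique (aApply ((pureOf rest).map (· + done.length)) arr (done ++ rest)).1
      (PySem.Str.join "." (aApply ((pureOf rest).map (· + done.length)) arr (done ++ rest)).2))
    = (bEmit (rest.foldl bStep (arr, done)).1
        (PySem.Str.join "." (rest.foldl bStep (arr, done)).2)) := by
  induction rest with
  | nil =>
    intro arr done
    simp [pureOf, aApply, bEmit, appendIfUnique]
  | cons t ts ih =>
    intro arr done
    have hstr : PySem.Str.startswith t "[" = PySem.Chars.startswith t.toList ['['] := by simp
    have hmap : ∀ ps : List Nat, (ps.map (· + 1)).map (· + done.length)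
        = ps.map (· + (done.length + 1)) := by
      intro ps; rw [List.map_map]; apply List.map_congr_left; intro x _; simp; omega
    cases hb : PySem.Chars.startswith t.toList ['['] with
    | false =>
      have hpure : (pureOf (t :: ts)).map (· + done.length)
          = (pureOf ts).map (· + (done ++ [t]).length) := by
        simp [pureOf, hb, hmap]
      have hlst : done ++ t :: ts = (done ++ [t]) ++ ts := by simp
      rw [hpure, hlst, ih arr (done ++ [t])]
      simp [bStep, hb]
    | true =>
      have hpure : (pureOf (t :: ts)).map (· + done.length)
          = done.length :: (pureOf ts).map (· + (done ++ ["[*]"]).length) := by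
        simp [pureOf, hb, hmap]
      rw [hpure]
      have step : aApply (done.length :: (pureOf ts).map (· + (done ++ ["[*]"]).length)) arr
            (done ++ t :: ts)
          = aApply ((pureOf ts).map (· + (done ++ ["[*]"]).length))
              (appendIfUnique arr (if done.isEmpty then t else PySem.Str.join "." done))
              ((done ++ ["[*]"]) ++ ts) := by
        rw [aApply, set_append_len]
        cases done with
        | nil => simp [List.getD]
        | cons x xs => rw [show (x :: xs ++ t :: ts).take (x :: xs).length = x :: xs from take_append_len (x :: xs) t ts]; simp
      rw [step, ih (appendIfUnique arr (if done.isEmpty then t else PySem.Str.join "." done))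
        (done ++ ["[*]"])]
      simp [bStep, hb, bEmit, appendIfUnique]

theorem per_el (arr : List String) (el : String) :
    (appendIfUnique
      (aApply (aCollect ((PySem.Str.split? el ".").getD []) 0 []) arr ((PySem.Str.split? el ".").getD [])).1
      (PySem.Str.join "."
        (aApply (aCollect ((PySem.Str.split? el ".").getD []) 0 []) arr ((PySem.Str.split? el ".").getD [])).2))
    = (bEmit (((PySem.Str.split? el ".").getD []).foldl bStep (arr, [])).1
        (PySem.Str.join "." (((PySem.Str.split? el ".").getD []).foldl bStep (arr, [])).2)) := by
  have h0 : aCollect ((PySem.Str.split? el ".").getD []) 0 []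
      = (pureOf ((PySem.Str.split? el ".").getD [])).map (· + ([] : List String).length) := by
    simpa using collect_eq ((PySem.Str.split? el ".").getD []) [] []
  rw [h0]
  exact main_eq ((PySem.Str.split? el ".").getD []) arr []

theorem folds_eq (l : List String) : ∀ init : List String,
    l.foldl (fun additional_arr el =>
      let lst := (PySem.Str.split? el ".").getD []
      let pure := aCollect lst 0 []
      let p := aApply pure additional_arr lst
      appendIfUnique p.1 (PySem.Str.join "." p.2)) init
    = l.foldl (fun out el =>
      let st := ((PySem.Str.split? el ".").getD []).foldl bStep (out, [])
      bEmit st.1 (PySem.Str.join "." st.2)) init := by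
  induction l with
  | nil => intro init; rfl
  | cons e es ih =>
    intro init
    simp only [List.foldl_cons]
    rw [per_el init e, ih]

-- ===== VERDICT (by name: the statement is the Claim_ definition above) =====
theorem extend_path_combination_py_spec : Claim_equal_extend_path_combination_py := by
  intro ol _
  unfold Spec_extend_path_combination_py extend_path_combination_py extend_path_combination_py_alt
  exact folds_eq ol []
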